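-- pv_equiv track=rewrite | github.com/galakurpi/lightweight_crm | backend/api/chat_service.py | find_matching_leads
-- ===== SOURCE A (Python) =====
-- from typing import Dict, List, Optional, Any
--
-- def find_matching_leads(query: str, leads: List[Dict]) -> List[Dict]:
--     """
--     Find leads that match the search query using fuzzy matching.
--
--     Args:
--         query (str): Search query
--         leads (List[Dict]): Available leads
--
--     Returns:
--         List[Dict]: Matching leads sorted by relevance
--     """
--     if not query or not leads:
--         return []
--
--     query_lower = query.lower()
--     matches = []
--
--     for lead in leads:
--         score = 0
--
--         # Name matching (highest weight)
--         if lead.get('name') and query_lower in lead['name'].lower():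
--             score += 70
--             if lead['name'].lower().startswith(query_lower):
--                 score += 20  # Bonus for prefix match
--
--         # Company matching
--         if lead.get('company') and query_lower in lead['company'].lower():
--             score += 20
--
--         # Email matching
--         if lead.get('email') and query_lower in lead['email'].lower():
--             score += 10
--
--         if score > 0:
--             matches.append((lead, score))
--
--     # Sort by score descending and return leads
--     matches.sort(key=lambda x: x[1], reverse=True)
--     return [match[0] for match in matches]
-- ===== SOURCE B (Python) =====
-- _WEIGHTS = (('name', 70), ('company', 20), ('email', 10))
-- _SCALE = (120, 110, 100, 90, 80, 70, 30, 20, 10)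
--
--
-- def _relevance(q, lead):
--     """Score of one lead for the (already lowercased) query q."""
--     total = 0
--     for field, weight in _WEIGHTS:
--         value = lead.get(field)
--         if value and q in value.lower():
--             total += weight
--     name = lead.get('name')
--     if name and name.lower().startswith(q):
--         total += 20  # prefix bonus (a prefix match is always a substring match)
--     return total
--
--
-- def find_matching_leads(query, leads):
--     if not query or not leads:
--         return []
--     q = query.lower()
--     # Bucket sort: group the leads by score in one pass, then emit the
--     # buckets in descending score order (bucket 0 is simply never emitted).
--     buckets = {}
--     for lead in leads:
--         buckets.setdefault(_relevance(q, lead), []).append(lead)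
--     return [lead for s in _SCALE for lead in buckets.get(s, [])]
-- ===== Notes on version B (the rewrite author's own statement) =====
-- stated objective: alternative
-- what changed: B scores each lead with a data-driven weight table and groups leads into a dict of score buckets in one pass, then concatenates the buckets over the fixed descending score scale, replacing A's append-matches-then-stable-sort pipeline with a bucket sort and no sort call.
import Mathlib
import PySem

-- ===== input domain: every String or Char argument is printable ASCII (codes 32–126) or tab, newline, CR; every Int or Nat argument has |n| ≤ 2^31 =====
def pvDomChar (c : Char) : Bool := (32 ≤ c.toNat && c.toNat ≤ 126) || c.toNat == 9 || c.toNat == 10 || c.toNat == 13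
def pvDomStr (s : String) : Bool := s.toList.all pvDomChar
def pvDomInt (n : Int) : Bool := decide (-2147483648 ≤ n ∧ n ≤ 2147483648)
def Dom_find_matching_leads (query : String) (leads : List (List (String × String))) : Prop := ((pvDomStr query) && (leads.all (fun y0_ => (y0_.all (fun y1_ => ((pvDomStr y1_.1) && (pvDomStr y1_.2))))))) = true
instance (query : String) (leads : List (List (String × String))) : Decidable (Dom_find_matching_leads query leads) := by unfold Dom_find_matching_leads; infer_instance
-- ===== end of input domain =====

-- B replaces A's collect-pairs-then-stable-sort with a one-pass bucket sort: a
-- weight-table score, a dict grouping leads by score, and the buckets emitted in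
-- descending score order (no sort call); same return value, objective: alternative.

-- ===== PORT A =====
-- per-lead score exactly as A's loop body computes it (sequential += steps)
def pvScoreA (ql : List Char) (lead : List (String × String)) : Int :=
  let score : Int := 0
  let score :=
    match (PySem.Dict.mk lead).get? "name" with
    | some n =>
      if n ≠ "" ∧ PySem.Chars.isIn ql (PySem.Chars.lower n.toList) then
        let score := score + 70
        if PySem.Chars.startswith (PySem.Chars.lower n.toList) ql then score + 20 else score
      else score
    | none => score
  let score :=
    match (PySem.Dict.mk lead).get? "company" with
    | some c => if c ≠ "" ∧ PySem.Chars.isIn ql (PySem.Chars.lower c.toList) then score + 20 else score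
    | none => score
  let score :=
    match (PySem.Dict.mk lead).get? "email" with
    | some e => if e ≠ "" ∧ PySem.Chars.isIn ql (PySem.Chars.lower e.toList) then score + 10 else score
    | none => score
  score

def find_matching_leads (query : String) (leads : List (List (String × String))) : List (List (String × String)) :=
  if query = "" ∨ leads = [] then []
  else
    let query_lower := PySem.Chars.lower query.toList
    let matchesL := leads.foldl (fun acc lead =>
      let score := pvScoreA query_lower lead
      if 0 < score then acc ++ [(lead, score)] else acc) []
    let matchesL := PySem.List.sorted matchesL (fun x => x.2) true
    matchesL.map (fun m => m.1)

-- ===== PORT B =====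
-- Source B's _relevance: a fold over the weight table, then the prefix bonus
def pvScoreB (q : List Char) (lead : List (String × String)) : Int :=
  let total := [("name", (70 : Int)), ("company", 20), ("email", 10)].foldl
    (fun t fw =>
      match (PySem.Dict.mk lead).get? fw.1 with
      | some v => if v ≠ "" ∧ PySem.Chars.isIn q (PySem.Chars.lower v.toList) then t + fw.2 else t
      | none => t) 0
  match (PySem.Dict.mk lead).get? "name" with
  | some n => if n ≠ "" ∧ PySem.Chars.startswith (PySem.Chars.lower n.toList) q then total + 20 else total
  | none => total

def find_matching_leads_alt (query : String) (leads : List (List (String × String))) : List (List (String × String)) :=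
  if query = "" ∨ leads = [] then []
  else
    let q := PySem.Chars.lower query.toList
    let buckets := leads.foldl
      (fun d lead => d.modify (pvScoreB q lead) [] (· ++ [lead])) PySem.Dict.empty
    [(120 : Int), 110, 100, 90, 80, 70, 30, 20, 10].flatMap (fun s => buckets.getD s [])

-- ===== PRECONDITION & SPEC =====
def Spec_find_matching_leads (query : String) (leads : List (List (String × String))) (out : List (List (String × String))) : Prop := out = find_matching_leads_alt query leads
instance (query : String) (leads : List (List (String × String))) (out : List (List (String × String))) : Decidable (Spec_find_matching_leads query leads out) := by unfold Spec_find_matching_leads; infer_instance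

-- ===== CLAIM (what is proved, stated in full; the proofs are below) =====
def Claim_equal_find_matching_leads : Prop := ∀ (query : String) (leads : List (List (String × String))), Dom_find_matching_leads query leads → Spec_find_matching_leads query leads (find_matching_leads query leads)

-- ===== LEMMAS AND PROOFS =====

-- a prefix match is a substring match
lemma pvSw_isIn (n q : List Char) (h : PySem.Chars.startswith n q = true) :
    PySem.Chars.isIn q n = true := by
  rw [PySem.Chars.isIn_iff_infix]
  exact ((PySem.Chars.startswith_iff n q).mp h).isInfix

-- the two per-lead scores coincide
lemma pvBonus_iff (q : List Char) (n : String) :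
    (n ≠ "" ∧ PySem.Chars.startswith (PySem.Chars.lower n.toList) q = true) ↔
      ((n ≠ "" ∧ PySem.Chars.isIn q (PySem.Chars.lower n.toList) = true) ∧
        PySem.Chars.startswith (PySem.Chars.lower n.toList) q = true) :=
  ⟨fun ⟨a, b⟩ => ⟨⟨a, pvSw_isIn _ _ b⟩, b⟩, fun ⟨⟨a, _⟩, b⟩ => ⟨a, b⟩⟩

set_option maxHeartbeats 2000000 in
lemma pvScore_eq (q : List Char) (lead : List (String × String)) :
    pvScoreA q lead = pvScoreB q lead := by
  unfold pvScoreA pvScoreB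
  cases hn : (PySem.Dict.mk lead).get? "name" <;>
    cases hc : (PySem.Dict.mk lead).get? "company" <;>
      cases he : (PySem.Dict.mk lead).get? "email" <;>
        simp only [List.foldl, hn, hc, he, pvBonus_iff] <;>
          (try split_ifs) <;> tauto

-- every positive B-score lies on the fixed descending scale
set_option maxHeartbeats 2000000 in
lemma pvScoreB_mem (q : List Char) (lead : List (String × String))
    (h : 0 < pvScoreB q lead) :
    pvScoreB q lead ∈ [(120 : Int), 110, 100, 90, 80, 70, 30, 20, 10] := by
  unfold pvScoreB at h ⊢
  cases hn : (PySem.Dict.mk lead).get? "name" <;>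
    cases hc : (PySem.Dict.mk lead).get? "company" <;>
      cases he : (PySem.Dict.mk lead).get? "email" <;>
        simp only [List.foldl, hn, hc, he, pvBonus_iff] at h ⊢ <;>
          (try split_ifs at h ⊢) <;> first | tauto | (revert h; decide)

lemma pvInsertBy_cons_of_before {α : Type} (before : α → α → Bool) (x y : α) (l : List α)
    (h : before x y = true) :
    PySem.List.insertBy before x (y :: l) = x :: y :: l := by
  simp [PySem.List.insertBy, h]

lemma pvInsertBy_append_not {α : Type} (before : α → α → Bool) (x : α) (l₁ l₂ : List α)
    (h : ∀ y ∈ l₁, before x y = false) :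
    PySem.List.insertBy before x (l₁ ++ l₂) = l₁ ++ PySem.List.insertBy before x l₂ := by
  induction l₁ with
  | nil => simp
  | cons a t ih =>
    have ha : before x a = false := h a (by simp)
    simp only [List.cons_append, PySem.List.insertBy, ha]
    simp [ih (fun y hy => h y (by simp [hy]))]

-- inserting x (reverse order) into descending buckets appends it to its own bucket
lemma pvInsertBy_flatMap {α : Type} (x : α × Int) (S : List Int)
    (hS : S.Pairwise (· > ·)) (hx : x.2 ∈ S) (B : Int → List (α × Int))
    (hB : ∀ s ∈ S, ∀ p ∈ B s, p.2 = s) :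
    PySem.List.insertBy (fun a b => decide (b.2 < a.2)) x (S.flatMap B) =
      S.flatMap (fun s => B s ++ if x.2 = s then [x] else []) := by
  induction S with
  | nil => simp at hx
  | cons s S' ih =>
    have hlt : ∀ t ∈ S', t < s := by
      intro t ht; exact List.rel_of_pairwise_cons hS ht
    have hS' : S'.Pairwise (· > ·) := hS.of_cons
    have hBs : ∀ p ∈ B s, p.2 = s := hB s (by simp)
    have hB' : ∀ t ∈ S', ∀ p ∈ B t, p.2 = t := fun t ht => hB t (by simp [ht])
    by_cases hxs : x.2 = s
    · -- x belongs to the first bucket: it goes after B s, before the rest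
      have hnot : ∀ y ∈ B s, (fun a b => decide (b.2 < a.2)) x y = false := by
        intro y hy; simp [hBs y hy, hxs]
      rw [List.flatMap_cons, pvInsertBy_append_not _ _ _ _ hnot]
      have htail : PySem.List.insertBy (fun a b => decide (b.2 < a.2)) x (S'.flatMap B) =
          x :: S'.flatMap B := by
        cases hfb : S'.flatMap B with
        | nil => simp [PySem.List.insertBy]
        | cons y t =>
          have hy : y ∈ S'.flatMap B := by rw [hfb]; simp
          obtain ⟨u, hu, hyu⟩ := List.mem_flatMap.mp hy
          have hylt : y.2 < x.2 := by rw [hB' u hu y hyu, hxs]; exact hlt u hu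
          rw [pvInsertBy_cons_of_before _ _ _ _ (by simp [hylt])]
      rw [htail]
      have hrest : S'.flatMap (fun t => B t ++ if x.2 = t then [x] else []) = S'.flatMap B := by
        apply List.flatMap_congr
        intro t ht
        have hne : x.2 ≠ t := by have := hlt t ht; omega
        simp [hne]
      rw [List.flatMap_cons, hrest, if_pos hxs]
      simp
    · -- x belongs to a later bucket: skip B s entirely
      have hxS' : x.2 ∈ S' := by
        rcases List.mem_cons.mp hx with h | h
        · exact absurd h hxs
        · exact h
      have hnot : ∀ y ∈ B s, (fun a b => decide (b.2 < a.2)) x y = false := by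
        intro y hy
        have hxlt : x.2 < s := hlt _ hxS'
        have h2 : y.2 = s := hBs y hy
        simp only [decide_eq_false_iff_not, not_lt, h2]
        omega
      rw [List.flatMap_cons, pvInsertBy_append_not _ _ _ _ hnot,
        ih hS' hxS' hB']
      simp [List.flatMap_cons, hxs]

-- the stable reverse sort of a bucketed list is the descending concatenation of its buckets
lemma pvSorted_rev_buckets {α : Type} (S : List Int) (hS : S.Pairwise (· > ·))
    (ms : List (α × Int)) (hm : ∀ p ∈ ms, p.2 ∈ S) :
    PySem.List.sorted ms (fun p => p.2) true =
      S.flatMap (fun s => ms.filter (fun p => p.2 == s)) := by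
  induction ms using List.reverseRecOn with
  | nil => simp [PySem.List.sorted_rev_eq_foldl_insertBy]
  | append_singleton ms x ih =>
    have hm' : ∀ p ∈ ms, p.2 ∈ S := fun p hp => hm p (by simp [hp])
    have hx : x.2 ∈ S := hm x (by simp)
    rw [PySem.List.sorted_rev_eq_foldl_insertBy, List.foldl_append,
      ← PySem.List.sorted_rev_eq_foldl_insertBy, ih hm']
    simp only [List.foldl_cons, List.foldl_nil]
    rw [pvInsertBy_flatMap x S hS hx _ (by
      intro s hs p hp
      exact beq_iff_eq.mp (List.mem_filter.mp hp).2)]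
    apply List.flatMap_congr
    intro s hs
    simp only [List.filter_append, List.filter_cons, List.filter_nil, beq_iff_eq]

-- restricting to positive-score leads does not change a positive-score bucket
lemma pvFilter_pos (ql : List Char) (s : Int) (hpos : 0 < s)
    (leads : List (List (String × String))) :
    (((leads.filter (fun l => decide (0 < pvScoreB ql l))).map
        (fun l => (l, pvScoreB ql l))).filter (fun p => p.2 == s)) =
      ((leads.map (fun lead => (lead, pvScoreB ql lead))).filter (fun p => p.2 == s)) := by
  induction leads with
  | nil => rfl
  | cons a t ih =>
    by_cases h : pvScoreB ql a = s
    · have h0 : (0 : Int) < pvScoreB ql a := h ▸ hpos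
      simp [h, hpos, ih]
    · by_cases h0 : (0 : Int) < pvScoreB ql a <;>
        simp [beq_iff_eq, h, h0, ih]

-- key-on-the-left and key-on-the-right bucket extraction agree
lemma pvSwap_pairs (ql : List Char) (s : Int) (leads : List (List (String × String))) :
    ((leads.map (fun l => (pvScoreB ql l, l))).filter (fun p => p.1 == s)).map (fun p => p.2) =
      ((leads.map (fun l => (l, pvScoreB ql l))).filter (fun p => p.2 == s)).map (fun p => p.1) := by
  induction leads with
  | nil => rfl
  | cons a t ih =>
    by_cases h : pvScoreB ql a = s <;> simp [h, ih]

-- main computation lemma: A's collect/sort/project pipeline equals B's bucket pass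
lemma pvMain (ql : List Char) (leads : List (List (String × String))) :
    (PySem.List.sorted
        (leads.foldl (fun acc lead =>
          if 0 < pvScoreA ql lead then acc ++ [(lead, pvScoreA ql lead)] else acc) [])
        (fun x => x.2) true).map (fun m => m.1) =
      [(120 : Int), 110, 100, 90, 80, 70, 30, 20, 10].flatMap
        (fun s => (leads.foldl
          (fun d lead => d.modify (pvScoreB ql lead) [] (· ++ [lead])) PySem.Dict.empty).getD s []) := by
  have hfun : (fun (acc : List (List (String × String) × Int)) lead =>
      if 0 < pvScoreA ql lead then acc ++ [(lead, pvScoreA ql lead)] else acc) =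
      (fun acc lead => if (fun l => decide (0 < pvScoreB ql l)) lead = true then
        acc ++ [(fun l => (l, pvScoreB ql l)) lead] else acc) := by
    funext acc lead; rw [pvScore_eq]; simp
  rw [hfun, PySem.List.foldl_append_if (fun l => decide (0 < pvScoreB ql l))
    (fun l => (l, pvScoreB ql l)) leads [], List.nil_append]
  rw [pvSorted_rev_buckets [(120 : Int), 110, 100, 90, 80, 70, 30, 20, 10] (by decide) _ (by
    intro p hp
    obtain ⟨l, hl, rfl⟩ := List.mem_map.mp hp
    exact pvScoreB_mem ql l (by simpa using (List.mem_filter.mp hl).2))]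
  rw [List.map_flatMap]
  -- B's fold keyed by the score is the same fold over (score, lead) pairs
  have hfold : leads.foldl
      (fun d lead => d.modify (pvScoreB ql lead) [] (· ++ [lead])) PySem.Dict.empty =
      (leads.map (fun l => (pvScoreB ql l, l))).foldl
        (fun d p => d.modify p.1 [] (· ++ [p.2])) PySem.Dict.empty := by
    rw [List.foldl_map]
  apply List.flatMap_congr
  intro s hs
  have hpos : (0 : Int) < s := by
    simp only [List.mem_cons, List.not_mem_nil, or_false] at hs
    rcases hs with rfl | rfl | rfl | rfl | rfl | rfl | rfl | rfl | rfl <;> norm_num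
  rw [pvFilter_pos ql s hpos leads, hfold,
    PySem.Dict.getD_foldl_modify_append, PySem.Dict.getD_empty, List.nil_append,
    pvSwap_pairs]

-- ===== VERDICT (by name: the statement is the Claim_ definition above) =====
theorem find_matching_leads_spec : Claim_equal_find_matching_leads := by
  intro query leads _
  unfold Spec_find_matching_leads
  by_cases hguard : query = "" ∨ leads = []
  · simp [find_matching_leads, find_matching_leads_alt, hguard]
  · simp only [find_matching_leads, find_matching_leads_alt, if_neg hguard]
    exact pvMain (PySem.Chars.lower query.toList) leads
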